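-- pv_equiv track=rewrite | github.com/LuanaNitsche/ted-Inteligencia-artificial | Inteligencia Artificial/Etapa04v2.py | mapa_coracao
-- ===== SOURCE A (Python) =====
-- def mapa_coracao(n: int = 12) -> list[list[int]]:
--     """Cria um mapa de custos com miolo caro (3) e anel (2) ao redor — estilo “coração/losango”.
--
--     Resumo:
--         Inicia tudo com 1; aplica custo 3 em um losango central (raio Manhattan 2),
--         e custo 2 no anel com raio 3. Mantém (0,4) e (n-1,4) com custo 1 como exemplo
--         de início/fim baratos.
--
--     Args:
--         n (int, opcional): Tamanho do grid. Padrão: 12.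
--
--     Returns:
--         list[list[int]]: Matriz (n, n) com 1/2/3 configurados.
--     """
--     m = [[1 for _ in range(n)] for _ in range(n)]
--     cx, cy = 4, 5
--     for y in range(n):
--         for x in range(n):
--             d = abs(x - cx) + abs(y - cy)
--             if d <= 2:
--                 m[y][x] = 3
--             elif d == 3:
--                 m[y][x] = 2
--     m[0][4]   = 1
--     m[n-1][4] = 1
--     return m
-- ===== SOURCE B (Python) =====
-- def mapa_coracao(n: int = 12) -> list[list[int]]:
--     m = [[1] * n for _ in range(n)]
--     for dy in range(-3, 4):
--         for dx in range(-3, 4):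
--             y, x = 5 + dy, 4 + dx
--             if not (0 <= y < n and 0 <= x < n):
--                 continue
--             d = abs(dx) + abs(dy)
--             if d <= 2:
--                 m[y][x] = 3
--             elif d == 3:
--                 m[y][x] = 2
--     m[0][4] = 1
--     m[n - 1][4] = 1
--     return m
-- ===== Notes on version B (the rewrite author's own statement) =====
-- stated objective: faster
-- what changed: Instead of scanning every cell of the n-by-n grid and computing a Manhattan distance for each, B builds the rows by list-repeat and updates only the cells of the fixed 7x7 box around the diamond's center via offset loops with bounds checks, so the per-cell distance work no longer depends on n.
import Mathlib
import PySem

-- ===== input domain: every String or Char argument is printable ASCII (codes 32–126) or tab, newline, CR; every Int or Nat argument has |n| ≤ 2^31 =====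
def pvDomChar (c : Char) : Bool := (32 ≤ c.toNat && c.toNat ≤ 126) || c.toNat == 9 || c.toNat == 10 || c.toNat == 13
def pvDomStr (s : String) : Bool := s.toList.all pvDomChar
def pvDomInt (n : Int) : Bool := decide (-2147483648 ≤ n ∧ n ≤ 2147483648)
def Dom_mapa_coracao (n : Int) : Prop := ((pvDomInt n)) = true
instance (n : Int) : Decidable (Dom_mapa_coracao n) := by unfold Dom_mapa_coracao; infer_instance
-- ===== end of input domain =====

-- B touches only the fixed 7×7 box around the diamond's center instead of scanning every cell; same n×n result.

-- ===== PORT A =====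
-- m[y][x] = v, the Python item assignment both programs use; exact for in-range indices (guaranteed under Pre_)
def gridSet (m : List (List Int)) (y x v : Int) : List (List Int) :=
  PySem.List.pySetD m y (PySem.List.pySetD (PySem.List.pyGetD m y []) x v)

def mapa_coracao (n : Int) : List (List Int) :=
  let m0 := (PySem.List.pyRange 0 n 1).map (fun _ => (PySem.List.pyRange 0 n 1).map (fun _ => (1 : Int)))
  let m1 := (PySem.List.pyRange 0 n 1).foldl (fun m y =>
    (PySem.List.pyRange 0 n 1).foldl (fun m x =>
      if |x - 4| + |y - 5| ≤ 2 then gridSet m y x 3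
      else if |x - 4| + |y - 5| = 3 then gridSet m y x 2
      else m) m) m0
  let m2 := gridSet m1 0 4 1
  gridSet m2 (n - 1) 4 1

-- ===== PORT B =====
def mapa_coracao_alt (n : Int) : List (List Int) :=
  let m0 := (PySem.List.pyRange 0 n 1).map (fun _ => List.replicate n.toNat (1 : Int))
  let m1 := (PySem.List.pyRange (-3) 4 1).foldl (fun m dy =>
    (PySem.List.pyRange (-3) 4 1).foldl (fun m dx =>
      if 0 ≤ 5 + dy ∧ 5 + dy < n ∧ 0 ≤ 4 + dx ∧ 4 + dx < n then
        if |dx| + |dy| ≤ 2 then gridSet m (5 + dy) (4 + dx) 3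
        else if |dx| + |dy| = 3 then gridSet m (5 + dy) (4 + dx) 2
        else m
      else m) m) m0
  let m2 := gridSet m1 0 4 1
  gridSet m2 (n - 1) 4 1

-- ===== PRECONDITION & SPEC =====
-- Pre_ excludes exactly the grid sizes too small for the two fixed-cell assignments, on which the Python A raises IndexError (and B raises there too).
def Pre_mapa_coracao (n : Int) : Prop := 5 ≤ n
instance (n : Int) : Decidable (Pre_mapa_coracao n) := by unfold Pre_mapa_coracao; infer_instance
def pvWitness_mapa_coracao : Int := (12)

def Spec_mapa_coracao (n : Int) (out : List (List Int)) : Prop := out = mapa_coracao_alt n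
instance (n : Int) (out : List (List Int)) : Decidable (Spec_mapa_coracao n out) := by unfold Spec_mapa_coracao; infer_instance

-- ===== CLAIM (what is proved, stated in full; the proofs are below) =====
def Claim_equal_mapa_coracao : Prop := ∀ (n : Int), Dom_mapa_coracao n → Pre_mapa_coracao n → Spec_mapa_coracao n (mapa_coracao n)

-- ===== LEMMAS AND PROOFS =====

-- entry (i,j) of a grid
def EE (m : List (List Int)) (i j : Nat) : Int := (m.getD i []).getD j 0

-- the value the diamond/ring writes at (y,x), if any
def hv (y x : Int) : Option Int :=
  if |x - 4| + |y - 5| ≤ 2 then some 3 else if |x - 4| + |y - 5| = 3 then some 2 else none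

-- grid shape invariant
def GridInv (N : Nat) (m : List (List Int)) : Prop := m.length = N ∧ ∀ r ∈ m, r.length = N

theorem hv_idem (y x : Int) (t : Int) :
    (hv y x).getD ((hv y x).getD t) = (hv y x).getD t := by
  unfold hv; split_ifs <;> simp

theorem gridSet_inv {N : Nat} {m : List (List Int)} {y x v : Int} (hy : 0 ≤ y)
    (hm : GridInv N m) : GridInv N (gridSet m y x v) := by
  obtain ⟨hlen, hrow⟩ := hm
  unfold gridSet
  rw [PySem.List.pySetD_of_nonneg _ _ hy]
  by_cases hlt : y.toNat < m.length
  · refine ⟨by simpa using hlen, ?_⟩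
    intro r hr
    rcases List.mem_or_eq_of_mem_set hr with h | h
    · exact hrow r h
    · subst h
      rw [PySem.List.length_pySetD, PySem.List.pyGetD_eq_getElem _ _ hy (by omega)]
      exact hrow _ (List.getElem_mem _)
  · rw [List.set_eq_of_length_le (by omega)]
    exact ⟨hlen, hrow⟩

theorem gridSet_entry {N : Nat} {m : List (List Int)} {y x v : Int} (hy : 0 ≤ y) (hx : 0 ≤ x)
    (hm : GridInv N m) {i j : Nat} (hi : i < N) (hj : j < N) :
    EE (gridSet m y x v) i j = if (i : Int) = y ∧ (j : Int) = x then v else EE m i j := by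
  obtain ⟨hlen, hrow⟩ := hm
  unfold gridSet EE
  rw [PySem.List.pySetD_of_nonneg _ _ hy]
  simp only [List.getD_eq_getElem?_getD]
  by_cases hiy : (i : Int) = y
  · have hyt : y.toNat = i := by omega
    rw [hyt, List.getElem?_set_self (by omega), Option.getD_some,
        PySem.List.pySetD_of_nonneg _ _ hx, PySem.List.pyGetD_eq_getElem _ _ hy (by omega)]
    simp only [hyt]
    have hrl : m[i].length = N := hrow _ (List.getElem_mem _)
    by_cases hjx : (j : Int) = x
    · have hxt : x.toNat = j := by omega
      rw [hxt, List.getElem?_set_self (by omega), Option.getD_some]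
      simp [hiy, hjx]
    · have hxt : x.toNat ≠ j := by omega
      rw [List.getElem?_set_ne hxt, List.getElem?_eq_getElem (show i < m.length by omega),
          Option.getD_some]
      simp [hiy, hjx]
  · have hyt : y.toNat ≠ i := by omega
    rw [List.getElem?_set_ne hyt]
    simp [hiy]

-- ---- port A's loops ----

theorem foldA_inner_inv {N : Nat} (y : Int) (hy : 0 ≤ y) (xs : List Int)
    (m : List (List Int)) (hm : GridInv N m) :
    GridInv N (xs.foldl (fun m x =>
      if |x - 4| + |y - 5| ≤ 2 then gridSet m y x 3
      else if |x - 4| + |y - 5| = 3 then gridSet m y x 2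
      else m) m) := by
  induction xs generalizing m with
  | nil => exact hm
  | cons x xs ih =>
    refine ih _ ?_
    dsimp only
    split_ifs <;> first | exact gridSet_inv hy hm | exact hm

theorem foldA_inner_entry {N : Nat} (y : Int) (hy : 0 ≤ y) (xs : List Int)
    (hxs : ∀ x ∈ xs, 0 ≤ x) (m : List (List Int)) (hm : GridInv N m)
    {i j : Nat} (hi : i < N) (hj : j < N) :
    EE (xs.foldl (fun m x =>
      if |x - 4| + |y - 5| ≤ 2 then gridSet m y x 3
      else if |x - 4| + |y - 5| = 3 then gridSet m y x 2
      else m) m) i j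
      = if (i : Int) = y ∧ (j : Int) ∈ xs then (hv y j).getD (EE m i j) else EE m i j := by
  induction xs generalizing m with
  | nil => simp
  | cons x xs ih =>
    have hx : 0 ≤ x := hxs x (by simp)
    have hstep : ∀ m', GridInv N m' → EE ((fun m x =>
        if |x - 4| + |y - 5| ≤ 2 then gridSet m y x 3
        else if |x - 4| + |y - 5| = 3 then gridSet m y x 2
        else m) m' x) i j
        = if (i : Int) = y ∧ (j : Int) = x then (hv y j).getD (EE m' i j) else EE m' i j := by
      intro m' hm'
      dsimp only
      by_cases hc : (i : Int) = y ∧ (j : Int) = x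
      · obtain ⟨h1, h2⟩ := hc
        unfold hv
        rw [← h2]
        split_ifs with hd1 hd2 <;>
          simp_all [gridSet_entry hy hx hm' hi hj]
      · split_ifs <;> simp_all [gridSet_entry hy hx hm' hi hj]
    have hminv : GridInv N ((fun m x =>
        if |x - 4| + |y - 5| ≤ 2 then gridSet m y x 3
        else if |x - 4| + |y - 5| = 3 then gridSet m y x 2
        else m) m x) := by
      dsimp only; split_ifs <;> first | exact gridSet_inv hy hm | exact hm
    rw [List.foldl_cons, ih (fun a ha => hxs a (by simp [ha])) _ hminv, hstep m hm]
    by_cases h1 : (i : Int) = y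
    · by_cases h2 : (j : Int) ∈ xs
      · by_cases h3 : (j : Int) = x <;> simp [h1, h2, h3, hv_idem]
      · by_cases h3 : (j : Int) = x
        · simp only [h1, h3, List.mem_cons, true_or, and_self, if_pos, true_and]
          split_ifs with hmem
          · exact hv_idem _ _ _
          · rfl
        · simp [h1, h2, h3]
    · simp [h1]

theorem foldA_outer_entry {N : Nat} (n : Int) (hn : n.toNat = N) (hn0 : 0 ≤ n)
    (ys : List Int) (hys : ∀ y ∈ ys, 0 ≤ y) (m : List (List Int)) (hm : GridInv N m)
    {i j : Nat} (hi : i < N) (hj : j < N) :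
    EE (ys.foldl (fun m y =>
      (PySem.List.pyRange 0 n 1).foldl (fun m x =>
        if |x - 4| + |y - 5| ≤ 2 then gridSet m y x 3
        else if |x - 4| + |y - 5| = 3 then gridSet m y x 2
        else m) m) m) i j
      = if (i : Int) ∈ ys then (hv i j).getD (EE m i j) else EE m i j := by
  induction ys generalizing m with
  | nil => simp
  | cons y ys ih =>
    have hy : 0 ≤ y := hys y (by simp)
    have hxr : ∀ x ∈ PySem.List.pyRange 0 n 1, 0 ≤ x := by
      intro x hx; rw [PySem.List.mem_pyRange_one] at hx; omega
    have hjn : (j : Int) ∈ PySem.List.pyRange 0 n 1 := by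
      rw [PySem.List.mem_pyRange_one]; omega
    have hinv := foldA_inner_inv (N := N) y hy (PySem.List.pyRange 0 n 1) m hm
    rw [List.foldl_cons, ih (fun a ha => hys a (by simp [ha])) _ hinv,
        foldA_inner_entry y hy _ hxr m hm hi hj]
    by_cases h1 : (i : Int) = y
    · by_cases h2 : (i : Int) ∈ ys <;> simp [h1, h2, hjn, hv_idem]
    · simp [h1]

-- ---- port B's loops ----

theorem foldB_inner_inv {N : Nat} (n dy : Int) (hdy : -3 ≤ dy) (xs : List Int)
    (m : List (List Int)) (hm : GridInv N m) :
    GridInv N (xs.foldl (fun m dx =>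
      if 0 ≤ 5 + dy ∧ 5 + dy < n ∧ 0 ≤ 4 + dx ∧ 4 + dx < n then
        if |dx| + |dy| ≤ 2 then gridSet m (5 + dy) (4 + dx) 3
        else if |dx| + |dy| = 3 then gridSet m (5 + dy) (4 + dx) 2
        else m
      else m) m) := by
  induction xs generalizing m with
  | nil => exact hm
  | cons x xs ih =>
    refine ih _ ?_
    dsimp only
    split_ifs <;> first | exact gridSet_inv (by omega) hm | exact hm

theorem foldB_inner_entry {N : Nat} (n dy : Int) (hn : n.toNat = N) (hn0 : 0 ≤ n)
    (hdy : -3 ≤ dy) (xs : List Int) (hxs : ∀ x ∈ xs, -3 ≤ x)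
    (m : List (List Int)) (hm : GridInv N m) {i j : Nat} (hi : i < N) (hj : j < N) :
    EE (xs.foldl (fun m dx =>
      if 0 ≤ 5 + dy ∧ 5 + dy < n ∧ 0 ≤ 4 + dx ∧ 4 + dx < n then
        if |dx| + |dy| ≤ 2 then gridSet m (5 + dy) (4 + dx) 3
        else if |dx| + |dy| = 3 then gridSet m (5 + dy) (4 + dx) 2
        else m
      else m) m) i j
      = if (i : Int) = 5 + dy ∧ (j : Int) - 4 ∈ xs then (hv i j).getD (EE m i j) else EE m i j := by
  induction xs generalizing m with
  | nil => simp
  | cons x xs ih =>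
    have hx : -3 ≤ x := hxs x (by simp)
    have hstep : ∀ m', GridInv N m' → EE ((fun m dx =>
        if 0 ≤ 5 + dy ∧ 5 + dy < n ∧ 0 ≤ 4 + dx ∧ 4 + dx < n then
          if |dx| + |dy| ≤ 2 then gridSet m (5 + dy) (4 + dx) 3
          else if |dx| + |dy| = 3 then gridSet m (5 + dy) (4 + dx) 2
          else m
        else m) m' x) i j
        = if (i : Int) = 5 + dy ∧ (j : Int) - 4 = x then (hv i j).getD (EE m' i j) else EE m' i j := by
      intro m' hm'
      dsimp only
      by_cases hc : (i : Int) = 5 + dy ∧ (j : Int) - 4 = x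
      · obtain ⟨h1, h2⟩ := hc
        have hg : 0 ≤ 5 + dy ∧ 5 + dy < n ∧ 0 ≤ 4 + x ∧ 4 + x < n :=
          ⟨by omega, by omega, by omega, by omega⟩
        rw [if_pos hg, if_pos (show (i : Int) = 5 + dy ∧ (j : Int) - 4 = x from ⟨h1, h2⟩)]
        have habs : |(j : Int) - 4| + |(i : Int) - 5| = |x| + |dy| := by
          rw [show (j : Int) - 4 = x from h2, show (i : Int) - 5 = dy from by omega]
        split_ifs with hd1 hd2
        · rw [gridSet_entry (by omega) (by omega) hm' hi hj,
              if_pos (show (i : Int) = 5 + dy ∧ (j : Int) = 4 + x from ⟨h1, by omega⟩)]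
          unfold hv
          rw [habs, if_pos hd1]
          rfl
        · rw [gridSet_entry (by omega) (by omega) hm' hi hj,
              if_pos (show (i : Int) = 5 + dy ∧ (j : Int) = 4 + x from ⟨h1, by omega⟩)]
          unfold hv
          rw [habs, if_neg hd1, if_pos hd2]
          rfl
        · unfold hv
          rw [habs, if_neg hd1, if_neg hd2]
          rfl
      · rw [if_neg hc]
        split_ifs with hg hd1 hd2
        · rw [gridSet_entry (by omega) (by omega) hm' hi hj,
              if_neg (show ¬((i : Int) = 5 + dy ∧ (j : Int) = 4 + x) from
                fun h => hc ⟨h.1, by omega⟩)]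
        · rw [gridSet_entry (by omega) (by omega) hm' hi hj,
              if_neg (show ¬((i : Int) = 5 + dy ∧ (j : Int) = 4 + x) from
                fun h => hc ⟨h.1, by omega⟩)]
        · rfl
        · rfl
    have hminv : GridInv N ((fun m dx =>
        if 0 ≤ 5 + dy ∧ 5 + dy < n ∧ 0 ≤ 4 + dx ∧ 4 + dx < n then
          if |dx| + |dy| ≤ 2 then gridSet m (5 + dy) (4 + dx) 3
          else if |dx| + |dy| = 3 then gridSet m (5 + dy) (4 + dx) 2
          else m
        else m) m x) := by
      dsimp only; split_ifs <;> first | exact gridSet_inv (by omega) hm | exact hm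
    rw [List.foldl_cons, ih (fun a ha => hxs a (by simp [ha])) _ hminv, hstep m hm]
    by_cases h1 : (i : Int) = 5 + dy
    · by_cases h2 : (j : Int) - 4 ∈ xs
      · by_cases h3 : (j : Int) - 4 = x <;> simp [h1, h2, h3, hv_idem]
      · by_cases h3 : (j : Int) - 4 = x
        · simp only [h1, h3, List.mem_cons, true_or, and_self, if_pos, true_and]
          split_ifs with hmem
          · exact hv_idem _ _ _
          · rfl
        · simp [h1, h2, h3]
    · simp [h1]

theorem foldB_outer_entry {N : Nat} (n : Int) (hn : n.toNat = N) (hn0 : 0 ≤ n)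
    (ys : List Int) (hys : ∀ y ∈ ys, -3 ≤ y) (m : List (List Int)) (hm : GridInv N m)
    {i j : Nat} (hi : i < N) (hj : j < N) :
    EE (ys.foldl (fun m dy =>
      (PySem.List.pyRange (-3) 4 1).foldl (fun m dx =>
        if 0 ≤ 5 + dy ∧ 5 + dy < n ∧ 0 ≤ 4 + dx ∧ 4 + dx < n then
          if |dx| + |dy| ≤ 2 then gridSet m (5 + dy) (4 + dx) 3
          else if |dx| + |dy| = 3 then gridSet m (5 + dy) (4 + dx) 2
          else m
        else m) m) m) i j
      = if (i : Int) - 5 ∈ ys ∧ (j : Int) - 4 ∈ PySem.List.pyRange (-3) 4 1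
          then (hv i j).getD (EE m i j) else EE m i j := by
  induction ys generalizing m with
  | nil => simp
  | cons y ys ih =>
    have hy : -3 ≤ y := hys y (by simp)
    have hxr : ∀ x ∈ PySem.List.pyRange (-3) 4 1, -3 ≤ x := by
      intro x hx; rw [PySem.List.mem_pyRange_one] at hx; omega
    have hinv := foldB_inner_inv (N := N) n y hy (PySem.List.pyRange (-3) 4 1) m hm
    rw [List.foldl_cons, ih (fun a ha => hys a (by simp [ha])) _ hinv,
        foldB_inner_entry n y hn hn0 hy _ hxr m hm hi hj]
    by_cases h1 : (i : Int) = 5 + y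
    · have h1' : (i : Int) - 5 = y := by omega
      by_cases h2 : (i : Int) - 5 ∈ ys <;>
        by_cases h3 : (j : Int) - 4 ∈ PySem.List.pyRange (-3) 4 1 <;>
          simp [h1, h1', h2, h3, hv_idem]
    · have h1' : (i : Int) - 5 ≠ y := by omega
      by_cases h2 : (i : Int) - 5 ∈ ys <;> simp [h1, h1', h2]

-- the diamond update only affects the 7×7 box, so B's boxed update equals A's full-grid value
theorem hv_outside_box (i j : Nat)
    (h : ¬(((i : Int) - 5 ≥ -3 ∧ (i : Int) - 5 < 4) ∧ ((j : Int) - 4 ≥ -3 ∧ (j : Int) - 4 < 4))) :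
    hv i j = none := by
  unfold hv
  have a1 := le_abs_self ((j : Int) - 4)
  have a2 := neg_abs_le ((j : Int) - 4)
  have a3 := le_abs_self ((i : Int) - 5)
  have a4 := neg_abs_le ((i : Int) - 5)
  have a5 := abs_nonneg ((j : Int) - 4)
  have a6 := abs_nonneg ((i : Int) - 5)
  split_ifs with h1 h2
  · exfalso; omega
  · exfalso; omega
  · rfl

theorem inv_m0A {n : Int} (hn0 : 0 ≤ n) :
    GridInv n.toNat ((PySem.List.pyRange 0 n 1).map (fun _ => (PySem.List.pyRange 0 n 1).map (fun _ => (1 : Int)))) := by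
  constructor
  · simp [PySem.List.length_pyRange_one]
  · intro r hr
    simp only [List.mem_map] at hr
    obtain ⟨_, _, rfl⟩ := hr
    simp [PySem.List.length_pyRange_one]

theorem inv_m0B {n : Int} (hn0 : 0 ≤ n) :
    GridInv n.toNat ((PySem.List.pyRange 0 n 1).map (fun _ => List.replicate n.toNat (1 : Int))) := by
  constructor
  · simp [PySem.List.length_pyRange_one]
  · intro r hr
    simp only [List.mem_map] at hr
    obtain ⟨_, _, rfl⟩ := hr
    simp

theorem EE_m0A {n : Int} (hn0 : 0 ≤ n) {i j : Nat} (hi : i < n.toNat) (hj : j < n.toNat) :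
    EE ((PySem.List.pyRange 0 n 1).map (fun _ => (PySem.List.pyRange 0 n 1).map (fun _ => (1 : Int)))) i j = 1 := by
  unfold EE
  simp only [List.getD_eq_getElem?_getD]
  rw [List.getElem?_map, List.getElem?_eq_getElem
        (show i < (PySem.List.pyRange 0 n 1).length by rw [PySem.List.length_pyRange_one]; omega)]
  simp only [Option.map_some, Option.getD_some]
  rw [List.getElem?_map, List.getElem?_eq_getElem
        (show j < (PySem.List.pyRange 0 n 1).length by rw [PySem.List.length_pyRange_one]; omega)]
  simp

theorem EE_m0B {n : Int} (hn0 : 0 ≤ n) {i j : Nat} (hi : i < n.toNat) (hj : j < n.toNat) :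
    EE ((PySem.List.pyRange 0 n 1).map (fun _ => List.replicate n.toNat (1 : Int))) i j = 1 := by
  unfold EE
  simp only [List.getD_eq_getElem?_getD]
  rw [List.getElem?_map, List.getElem?_eq_getElem
        (show i < (PySem.List.pyRange 0 n 1).length by rw [PySem.List.length_pyRange_one]; omega)]
  simp only [Option.map_some, Option.getD_some]
  rw [List.getElem?_eq_getElem (show j < (List.replicate n.toNat (1 : Int)).length by simpa using hj)]
  simp

-- grid equality from shape + pointwise entries
theorem grid_ext {N : Nat} {m1 m2 : List (List Int)} (h1 : GridInv N m1) (h2 : GridInv N m2)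
    (h : ∀ i j, i < N → j < N → EE m1 i j = EE m2 i j) : m1 = m2 := by
  obtain ⟨hl1, hr1⟩ := h1
  obtain ⟨hl2, hr2⟩ := h2
  apply List.ext_getElem (by omega)
  intro i hi1 hi2
  have hri1 : m1[i].length = N := hr1 _ (List.getElem_mem _)
  have hri2 : m2[i].length = N := hr2 _ (List.getElem_mem _)
  apply List.ext_getElem (by omega)
  intro j hj1 hj2
  have hee := h i j (by omega) (by omega)
  unfold EE at hee
  simp only [List.getD_eq_getElem?_getD, List.getElem?_eq_getElem hi1,
    List.getElem?_eq_getElem hi2, Option.getD_some] at hee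
  rwa [List.getElem?_eq_getElem hj1, List.getElem?_eq_getElem hj2,
    Option.getD_some, Option.getD_some] at hee

-- named forms of the two ports' computations (definitionally equal to the ports)
def m0A (n : Int) : List (List Int) :=
  (PySem.List.pyRange 0 n 1).map (fun _ => (PySem.List.pyRange 0 n 1).map (fun _ => (1 : Int)))

def coreA (n : Int) : List (List Int) :=
  (PySem.List.pyRange 0 n 1).foldl (fun m y =>
    (PySem.List.pyRange 0 n 1).foldl (fun m x =>
      if |x - 4| + |y - 5| ≤ 2 then gridSet m y x 3
      else if |x - 4| + |y - 5| = 3 then gridSet m y x 2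
      else m) m) (m0A n)

theorem mapaA_eq (n : Int) :
    mapa_coracao n = gridSet (gridSet (coreA n) 0 4 1) (n - 1) 4 1 := rfl

def m0B (n : Int) : List (List Int) :=
  (PySem.List.pyRange 0 n 1).map (fun _ => List.replicate n.toNat (1 : Int))

def coreB (n : Int) : List (List Int) :=
  (PySem.List.pyRange (-3) 4 1).foldl (fun m dy =>
    (PySem.List.pyRange (-3) 4 1).foldl (fun m dx =>
      if 0 ≤ 5 + dy ∧ 5 + dy < n ∧ 0 ≤ 4 + dx ∧ 4 + dx < n then
        if |dx| + |dy| ≤ 2 then gridSet m (5 + dy) (4 + dx) 3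
        else if |dx| + |dy| = 3 then gridSet m (5 + dy) (4 + dx) 2
        else m
      else m) m) (m0B n)

theorem mapaB_eq (n : Int) :
    mapa_coracao_alt n = gridSet (gridSet (coreB n) 0 4 1) (n - 1) 4 1 := rfl

theorem inv_coreA {n : Int} (hn0 : 0 ≤ n) : GridInv n.toNat (coreA n) := by
  unfold coreA m0A
  refine List.foldlRecOn _ _ (inv_m0A hn0) ?_
  intro m hm y hy
  exact foldA_inner_inv y (by rw [PySem.List.mem_pyRange_one] at hy; omega) _ m hm

theorem inv_coreB {n : Int} (hn0 : 0 ≤ n) : GridInv n.toNat (coreB n) := by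
  unfold coreB m0B
  refine List.foldlRecOn _ _ (inv_m0B hn0) ?_
  intro m hm y hy
  exact foldB_inner_inv n y (by rw [PySem.List.mem_pyRange_one] at hy; omega) _ m hm

theorem EE_coreA {n : Int} (hn0 : 0 ≤ n) {i j : Nat} (hi : i < n.toNat) (hj : j < n.toNat) :
    EE (coreA n) i j = (hv i j).getD 1 := by
  unfold coreA m0A
  rw [foldA_outer_entry n rfl hn0 _
        (fun y hy => by rw [PySem.List.mem_pyRange_one] at hy; omega) _ (inv_m0A hn0) hi hj,
      EE_m0A hn0 hi hj, if_pos (by rw [PySem.List.mem_pyRange_one]; omega)]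

theorem EE_coreB {n : Int} (hn0 : 0 ≤ n) {i j : Nat} (hi : i < n.toNat) (hj : j < n.toNat) :
    EE (coreB n) i j = (hv i j).getD 1 := by
  unfold coreB m0B
  rw [foldB_outer_entry n rfl hn0 _
        (fun y hy => by rw [PySem.List.mem_pyRange_one] at hy; omega) _ (inv_m0B hn0) hi hj,
      EE_m0B hn0 hi hj]
  by_cases hbox : ((i : Int) - 5 ∈ PySem.List.pyRange (-3) 4 1) ∧ ((j : Int) - 4 ∈ PySem.List.pyRange (-3) 4 1)
  · rw [if_pos hbox]
  · rw [if_neg hbox, hv_outside_box i j (by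
      simp only [PySem.List.mem_pyRange_one] at hbox
      omega)]
    rfl

-- ===== VERDICT (by name: the statement is the Claim_ definition above) =====
theorem mapa_coracao_spec : Claim_equal_mapa_coracao := by
  intro n _ hpre
  have hn5 : (5 : Int) ≤ n := hpre
  have hn0 : (0 : Int) ≤ n := by omega
  have hN5 : 5 ≤ n.toNat := by omega
  unfold Spec_mapa_coracao
  rw [mapaA_eq, mapaB_eq]
  have invA1 := inv_coreA hn0
  have invB1 := inv_coreB hn0
  have invA2 : GridInv n.toNat (gridSet (coreA n) 0 4 1) := gridSet_inv (by omega) invA1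
  have invB2 : GridInv n.toNat (gridSet (coreB n) 0 4 1) := gridSet_inv (by omega) invB1
  have invA3 : GridInv n.toNat (gridSet (gridSet (coreA n) 0 4 1) (n - 1) 4 1) :=
    gridSet_inv (by omega) invA2
  have invB3 : GridInv n.toNat (gridSet (gridSet (coreB n) 0 4 1) (n - 1) 4 1) :=
    gridSet_inv (by omega) invB2
  refine grid_ext invA3 invB3 ?_
  intro i j hi hj
  rw [gridSet_entry (by omega) (by omega) invA2 hi hj,
      gridSet_entry (by omega) (by omega) invB2 hi hj,
      gridSet_entry (by omega) (by omega) invA1 hi hj,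
      gridSet_entry (by omega) (by omega) invB1 hi hj,
      EE_coreA hn0 hi hj, EE_coreB hn0 hi hj]
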